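-- pv_equiv track=rewrite | github.com/baiMFAH/csp-ai-analysis | src/link_analysis_utils.py | attempt_direct_url_construction
-- ===== SOURCE A (Python) =====
-- def attempt_direct_url_construction(query):
--     """Attempt to construct direct URLs for known platforms and resources"""
--     query_lower = query.lower()
--     results = []
--
--     # YouTube searches
--     if any(term in query_lower for term in ['youtube', 'video', 'karpathy', 'zero to hero']):
--         if 'karpathy' in query_lower and 'zero to hero' in query_lower:
--             results.append({
--                 'url': 'https://www.youtube.com/playlist?list=PLAqhIrjkxbuWI23v9cThsA9GvCAUhRvKZ',
--                 'title': 'Neural Networks: Zero to Hero by Andrej Karpathy',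
--                 'snippet': 'Complete neural networks course'
--             })
--
--     # Coursera courses
--     if 'deep learning' in query_lower and any(name in query_lower for name in ['andrew ng', 'ng']):
--         results.append({
--             'url': 'https://www.coursera.org/specializations/deep-learning',
--             'title': 'Deep Learning Specialization by Andrew Ng',
--             'snippet': 'Complete deep learning specialization'
--         })
--
--     if 'machine learning' in query_lower and any(name in query_lower for name in ['andrew ng', 'ng', 'coursera']):
--         results.append({
--             'url': 'https://www.coursera.org/learn/machine-learning',
--             'title': 'Machine Learning by Andrew Ng - Coursera',
--             'snippet': 'Complete machine learning course'
--         })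
--
--     # DeepLearning.AI
--     if 'deeplearning.ai' in query_lower or 'deep learning ai' in query_lower:
--         results.append({
--             'url': 'https://www.deeplearning.ai/courses/',
--             'title': 'DeepLearning.AI Courses',
--             'snippet': 'AI courses and specializations'
--         })
--
--     # Fast.ai
--     if 'fast.ai' in query_lower or 'fastai' in query_lower:
--         results.append({
--             'url': 'https://www.fast.ai/',
--             'title': 'fast.ai - Practical Deep Learning',
--             'snippet': 'Practical deep learning for coders'
--         })
--
--     # Udemy generic
--     if 'udemy' in query_lower and 'python' in query_lower:
--         results.append({
--             'url': 'https://www.udemy.com/courses/search/?q=python',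
--             'title': 'Python Courses on Udemy',
--             'snippet': 'Python courses and tutorials'
--         })
--
--     # edX courses
--     if 'edx' in query_lower and any(term in query_lower for term in ['mit', 'harvard', 'cs50']):
--         if 'cs50' in query_lower:
--             results.append({
--                 'url': 'https://www.edx.org/course/cs50s-introduction-to-computer-science',
--                 'title': "CS50's Introduction to Computer Science - Harvard",
--                 'snippet': 'Harvard CS50 computer science course'
--             })
--
--     # Stanford courses
--     if 'stanford' in query_lower:
--         if 'cs229' in query_lower or ('machine learning' in query_lower and 'ng' in query_lower):
--             results.append({
--                 'url': 'http://cs229.stanford.edu/',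
--                 'title': 'CS229: Machine Learning - Stanford',
--                 'snippet': 'Stanford machine learning course'
--             })
--         if 'cs231n' in query_lower or 'computer vision' in query_lower:
--             results.append({
--                 'url': 'http://cs231n.stanford.edu/',
--                 'title': 'CS231n: Convolutional Neural Networks - Stanford',
--                 'snippet': 'Stanford computer vision course'
--             })
--
--     # Books - O'Reilly
--     if "o'reilly" in query_lower or 'oreilly' in query_lower:
--         results.append({
--             'url': 'https://www.oreilly.com/',
--             'title': "O'Reilly Media",
--             'snippet': 'Technical books and learning platform'
--         })
--
--     return results
-- ===== SOURCE B (Python) =====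
-- # Table-driven rewrite: one static RULES table of (predicate, result) pairs,
-- # with the logically-redundant outer guards simplified away.
-- RULES = [
--     (lambda q: 'karpathy' in q and 'zero to hero' in q,
--      {'url': 'https://www.youtube.com/playlist?list=PLAqhIrjkxbuWI23v9cThsA9GvCAUhRvKZ',
--       'title': 'Neural Networks: Zero to Hero by Andrej Karpathy',
--       'snippet': 'Complete neural networks course'}),
--     (lambda q: 'deep learning' in q and 'ng' in q,
--      {'url': 'https://www.coursera.org/specializations/deep-learning',
--       'title': 'Deep Learning Specialization by Andrew Ng',
--       'snippet': 'Complete deep learning specialization'}),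
--     (lambda q: 'machine learning' in q and ('ng' in q or 'coursera' in q),
--      {'url': 'https://www.coursera.org/learn/machine-learning',
--       'title': 'Machine Learning by Andrew Ng - Coursera',
--       'snippet': 'Complete machine learning course'}),
--     (lambda q: 'deeplearning.ai' in q or 'deep learning ai' in q,
--      {'url': 'https://www.deeplearning.ai/courses/',
--       'title': 'DeepLearning.AI Courses',
--       'snippet': 'AI courses and specializations'}),
--     (lambda q: 'fast.ai' in q or 'fastai' in q,
--      {'url': 'https://www.fast.ai/',
--       'title': 'fast.ai - Practical Deep Learning',
--       'snippet': 'Practical deep learning for coders'}),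
--     (lambda q: 'udemy' in q and 'python' in q,
--      {'url': 'https://www.udemy.com/courses/search/?q=python',
--       'title': 'Python Courses on Udemy',
--       'snippet': 'Python courses and tutorials'}),
--     (lambda q: 'edx' in q and 'cs50' in q,
--      {'url': 'https://www.edx.org/course/cs50s-introduction-to-computer-science',
--       'title': "CS50's Introduction to Computer Science - Harvard",
--       'snippet': 'Harvard CS50 computer science course'}),
--     (lambda q: 'stanford' in q and ('cs229' in q or ('machine learning' in q and 'ng' in q)),
--      {'url': 'http://cs229.stanford.edu/',
--       'title': 'CS229: Machine Learning - Stanford',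
--       'snippet': 'Stanford machine learning course'}),
--     (lambda q: 'stanford' in q and ('cs231n' in q or 'computer vision' in q),
--      {'url': 'http://cs231n.stanford.edu/',
--       'title': 'CS231n: Convolutional Neural Networks - Stanford',
--       'snippet': 'Stanford computer vision course'}),
--     (lambda q: "o'reilly" in q or 'oreilly' in q,
--      {'url': 'https://www.oreilly.com/',
--       'title': "O'Reilly Media",
--       'snippet': 'Technical books and learning platform'}),
-- ]
--
-- def attempt_direct_url_construction(query):
--     """Attempt to construct direct URLs for known platforms and resources"""
--     query_lower = query.lower()
--     return [item for pred, item in RULES if pred(query_lower)]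
-- ===== Notes on version B (the rewrite author's own statement) =====
-- stated objective: simpler
-- what changed: Replaced A's chain of ten hardcoded if-blocks by a single static RULES table of (predicate, result) pairs scanned in one comprehension, simplifying logically-redundant outer guards (the YouTube any-gate, the edX any-gate, and the 'andrew ng' alternative subsumed by 'ng').
import Mathlib
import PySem

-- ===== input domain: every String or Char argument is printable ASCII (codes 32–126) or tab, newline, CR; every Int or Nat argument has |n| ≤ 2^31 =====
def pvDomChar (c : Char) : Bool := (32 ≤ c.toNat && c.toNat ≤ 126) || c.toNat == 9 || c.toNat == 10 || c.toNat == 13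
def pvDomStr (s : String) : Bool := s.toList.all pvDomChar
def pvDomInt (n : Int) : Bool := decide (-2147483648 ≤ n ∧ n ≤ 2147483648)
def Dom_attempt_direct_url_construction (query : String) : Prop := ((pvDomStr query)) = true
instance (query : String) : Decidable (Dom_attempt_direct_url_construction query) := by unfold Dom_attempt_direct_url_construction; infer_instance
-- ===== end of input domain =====

-- B replaces A's chain of hardcoded if-blocks by a single static rule table
-- (predicate, result) folded once, with logically-redundant outer guards simplified (objective: simpler).


-- shared result payloads (named literals)
def pvItem1 : List (String × String) := [("url", "https://www.youtube.com/playlist?list=PLAqhIrjkxbuWI23v9cThsA9GvCAUhRvKZ"), ("title", "Neural Networks: Zero to Hero by Andrej Karpathy"), ("snippet", "Complete neural networks course")]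
def pvItem2 : List (String × String) := [("url", "https://www.coursera.org/specializations/deep-learning"), ("title", "Deep Learning Specialization by Andrew Ng"), ("snippet", "Complete deep learning specialization")]
def pvItem3 : List (String × String) := [("url", "https://www.coursera.org/learn/machine-learning"), ("title", "Machine Learning by Andrew Ng - Coursera"), ("snippet", "Complete machine learning course")]
def pvItem4 : List (String × String) := [("url", "https://www.deeplearning.ai/courses/"), ("title", "DeepLearning.AI Courses"), ("snippet", "AI courses and specializations")]
def pvItem5 : List (String × String) := [("url", "https://www.fast.ai/"), ("title", "fast.ai - Practical Deep Learning"), ("snippet", "Practical deep learning for coders")]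
def pvItem6 : List (String × String) := [("url", "https://www.udemy.com/courses/search/?q=python"), ("title", "Python Courses on Udemy"), ("snippet", "Python courses and tutorials")]
def pvItem7 : List (String × String) := [("url", "https://www.edx.org/course/cs50s-introduction-to-computer-science"), ("title", "CS50's Introduction to Computer Science - Harvard"), ("snippet", "Harvard CS50 computer science course")]
def pvItem8 : List (String × String) := [("url", "http://cs229.stanford.edu/"), ("title", "CS229: Machine Learning - Stanford"), ("snippet", "Stanford machine learning course")]
def pvItem9 : List (String × String) := [("url", "http://cs231n.stanford.edu/"), ("title", "CS231n: Convolutional Neural Networks - Stanford"), ("snippet", "Stanford computer vision course")]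
def pvItem10 : List (String × String) := [("url", "https://www.oreilly.com/"), ("title", "O'Reilly Media"), ("snippet", "Technical books and learning platform")]

-- ===== PORT A =====
def attempt_direct_url_construction (query : String) : List (List (String × String)) :=
  let query_lower := PySem.Str.lower query
  let results : List (List (String × String)) := []
  -- YouTube searches
  let results :=
    if (["youtube", "video", "karpathy", "zero to hero"].any (fun term => PySem.Str.isIn term query_lower)) then
      (if PySem.Str.isIn "karpathy" query_lower && PySem.Str.isIn "zero to hero" query_lower then
        results ++ [pvItem1]
      else results)
    else results
  -- Coursera courses
  let results :=
    if PySem.Str.isIn "deep learning" query_lower && (["andrew ng", "ng"].any (fun name => PySem.Str.isIn name query_lower)) then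
      results ++ [pvItem2]
    else results
  let results :=
    if PySem.Str.isIn "machine learning" query_lower && (["andrew ng", "ng", "coursera"].any (fun name => PySem.Str.isIn name query_lower)) then
      results ++ [pvItem3]
    else results
  -- DeepLearning.AI
  let results :=
    if PySem.Str.isIn "deeplearning.ai" query_lower || PySem.Str.isIn "deep learning ai" query_lower then
      results ++ [pvItem4]
    else results
  -- Fast.ai
  let results :=
    if PySem.Str.isIn "fast.ai" query_lower || PySem.Str.isIn "fastai" query_lower then
      results ++ [pvItem5]
    else results
  -- Udemy generic
  let results :=
    if PySem.Str.isIn "udemy" query_lower && PySem.Str.isIn "python" query_lower then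
      results ++ [pvItem6]
    else results
  -- edX courses
  let results :=
    if PySem.Str.isIn "edx" query_lower && (["mit", "harvard", "cs50"].any (fun term => PySem.Str.isIn term query_lower)) then
      (if PySem.Str.isIn "cs50" query_lower then
        results ++ [pvItem7]
      else results)
    else results
  -- Stanford courses
  let results :=
    if PySem.Str.isIn "stanford" query_lower then
      (let results :=
        if PySem.Str.isIn "cs229" query_lower || (PySem.Str.isIn "machine learning" query_lower && PySem.Str.isIn "ng" query_lower) then
          results ++ [pvItem8]
        else results
      if PySem.Str.isIn "cs231n" query_lower || PySem.Str.isIn "computer vision" query_lower then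
        results ++ [pvItem9]
      else results)
    else results
  -- Books - O'Reilly
  let results :=
    if PySem.Str.isIn "o'reilly" query_lower || PySem.Str.isIn "oreilly" query_lower then
      results ++ [pvItem10]
    else results
  results

-- ===== PORT B =====
-- the static RULES table of Source B
def pvRules : List ((String → Bool) × List (String × String)) :=
  [ (fun q => PySem.Str.isIn "karpathy" q && PySem.Str.isIn "zero to hero" q,
     pvItem1),
    (fun q => PySem.Str.isIn "deep learning" q && PySem.Str.isIn "ng" q,
     pvItem2),
    (fun q => PySem.Str.isIn "machine learning" q && (PySem.Str.isIn "ng" q || PySem.Str.isIn "coursera" q),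
     pvItem3),
    (fun q => PySem.Str.isIn "deeplearning.ai" q || PySem.Str.isIn "deep learning ai" q,
     pvItem4),
    (fun q => PySem.Str.isIn "fast.ai" q || PySem.Str.isIn "fastai" q,
     pvItem5),
    (fun q => PySem.Str.isIn "udemy" q && PySem.Str.isIn "python" q,
     pvItem6),
    (fun q => PySem.Str.isIn "edx" q && PySem.Str.isIn "cs50" q,
     pvItem7),
    (fun q => PySem.Str.isIn "stanford" q && (PySem.Str.isIn "cs229" q || (PySem.Str.isIn "machine learning" q && PySem.Str.isIn "ng" q)),
     pvItem8),
    (fun q => PySem.Str.isIn "stanford" q && (PySem.Str.isIn "cs231n" q || PySem.Str.isIn "computer vision" q),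
     pvItem9),
    (fun q => PySem.Str.isIn "o'reilly" q || PySem.Str.isIn "oreilly" q,
     pvItem10) ]

def attempt_direct_url_construction_alt (query : String) : List (List (String × String)) :=
  let query_lower := PySem.Str.lower query
  -- [item for pred, item in RULES if pred(query_lower)]
  (pvRules.filter (fun r => r.1 query_lower)).map (fun r => r.2)

-- ===== PRECONDITION & SPEC =====
def Spec_attempt_direct_url_construction (query : String) (out : List (List (String × String))) : Prop := out = attempt_direct_url_construction_alt query
instance (query : String) (out : List (List (String × String))) : Decidable (Spec_attempt_direct_url_construction query out) := by unfold Spec_attempt_direct_url_construction; infer_instance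

-- ===== CLAIM (what is proved, stated in full; the proofs are below) =====
def Claim_equal_attempt_direct_url_construction : Prop := ∀ (query : String), Dom_attempt_direct_url_construction query → Spec_attempt_direct_url_construction query (attempt_direct_url_construction query)

-- ===== LEMMAS AND PROOFS =====

-- "andrew ng" in s implies "ng" in s (substring containment is transitive)
theorem pv_andrew_ng_imp_ng (s : String) (h : PySem.Str.isIn "andrew ng" s = true) :
    PySem.Str.isIn "ng" s = true := by
  rw [PySem.Str.isIn_iff_infix] at h ⊢
  exact List.IsInfix.trans (by decide) h

-- a redundant outer gate around an append step can be dropped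
theorem pv_gate {α : Type} (g c : Bool) (h : c = true → g = true) (acc : List α) (x : α) :
    (if g then (if c then acc ++ [x] else acc) else acc) = if c then acc ++ [x] else acc := by
  cases c
  · simp
  · simp [h rfl]

-- A's edX block equals the single rule 'edx and cs50'
theorem pv_edx {α : Type} (ex mi ha c50 : Bool) (acc : List α) (x : α) :
    (if ex && (mi || (ha || (c50 || false))) then (if c50 then acc ++ [x] else acc) else acc)
      = if ex && c50 then acc ++ [x] else acc := by
  cases ex <;> cases c50 <;> cases mi <;> cases ha <;> simp

-- A's Stanford block equals two sequential guarded rules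
theorem pv_stan {α : Type} (st a b : Bool) (acc : List α) (x y : α) :
    (if st then
        (let ra := if a then acc ++ [x] else acc
         if b then ra ++ [y] else ra)
      else acc)
      = (if st && b then (if st && a then acc ++ [x] else acc) ++ [y]
         else (if st && a then acc ++ [x] else acc)) := by
  cases st <;> simp

-- evaluating the rule table's predicates at a fixed query first does not change B's result
theorem pv_table_eval {α : Type} (q : String) (rules : List ((String → Bool) × α)) :
    (rules.filter (fun r => r.1 q)).map (fun r => r.2)
      = ((rules.map (fun r => (r.1 q, r.2))).filter (fun r => r.1)).map Prod.snd := by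
  induction rules with
  | nil => rfl
  | cons a l ih => by_cases h : a.1 q <;> simp [h, ih]

-- the two programs' control skeletons, abstracted to Bool atoms: A's append chain
-- equals B's filter-map table, given that the "andrew ng" atom implies the "ng" atom
theorem pv_chain {α : Type} (yt vd k z dl ang ng ml cou d1 d2 f1 f2 ud py ex mi ha c50 st c229 c231 cv o1 o2 : Bool)
    (hng : ang = true → ng = true) (x1 x2 x3 x4 x5 x6 x7 x8 x9 x10 : α) :
    (let r0 : List α := []
     let r1 := if yt || (vd || (k || (z || false))) then (if k && z then r0 ++ [x1] else r0) else r0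
     let r2 := if dl && (ang || (ng || false)) then r1 ++ [x2] else r1
     let r3 := if ml && (ang || (ng || (cou || false))) then r2 ++ [x3] else r2
     let r4 := if d1 || d2 then r3 ++ [x4] else r3
     let r5 := if f1 || f2 then r4 ++ [x5] else r4
     let r6 := if ud && py then r5 ++ [x6] else r5
     let r7 := if ex && (mi || (ha || (c50 || false))) then (if c50 then r6 ++ [x7] else r6) else r6
     let r8 := if st then
         (let ra := if c229 || (ml && ng) then r7 ++ [x8] else r7
          if c231 || cv then ra ++ [x9] else ra)
       else r7
     let r9 := if o1 || o2 then r8 ++ [x10] else r8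
     r9)
    =
    ((List.filter (fun r => r.1)
       [(k && z, x1), (dl && ng, x2), (ml && (ng || cou), x3), (d1 || d2, x4), (f1 || f2, x5),
        (ud && py, x6), (ex && c50, x7), (st && (c229 || (ml && ng)), x8),
        (st && (c231 || cv), x9), (o1 || o2, x10)]).map Prod.snd) := by
  have hk : (k && z) = true → (yt || (vd || (k || (z || false)))) = true := by
    intro h
    cases k
    · simp at h
    · simp
  have e2 : (ang || (ng || false)) = ng := by cases ang <;> simp_all
  have e3 : (ang || (ng || (cou || false))) = (ng || cou) := by cases ang <;> simp_all
  conv_rhs => rw [← List.nil_append (List.map Prod.snd (List.filter _ _))]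
  rw [← PySem.List.foldl_append_if]
  simp only [List.foldl_cons, List.foldl_nil, e2, e3, pv_gate _ _ hk, pv_edx, pv_stan]

-- ===== VERDICT (by name: the statement is the Claim_ definition above) =====
set_option maxHeartbeats 2000000 in
theorem attempt_direct_url_construction_spec : Claim_equal_attempt_direct_url_construction := by
  intro query _
  unfold Spec_attempt_direct_url_construction attempt_direct_url_construction_alt
  rw [pv_table_eval]
  simp only [pvRules, List.map_cons, List.map_nil]
  exact pv_chain
    (PySem.Str.isIn "youtube" (PySem.Str.lower query)) (PySem.Str.isIn "video" (PySem.Str.lower query))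
    (PySem.Str.isIn "karpathy" (PySem.Str.lower query)) (PySem.Str.isIn "zero to hero" (PySem.Str.lower query))
    (PySem.Str.isIn "deep learning" (PySem.Str.lower query)) (PySem.Str.isIn "andrew ng" (PySem.Str.lower query))
    (PySem.Str.isIn "ng" (PySem.Str.lower query)) (PySem.Str.isIn "machine learning" (PySem.Str.lower query))
    (PySem.Str.isIn "coursera" (PySem.Str.lower query)) (PySem.Str.isIn "deeplearning.ai" (PySem.Str.lower query))
    (PySem.Str.isIn "deep learning ai" (PySem.Str.lower query)) (PySem.Str.isIn "fast.ai" (PySem.Str.lower query))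
    (PySem.Str.isIn "fastai" (PySem.Str.lower query)) (PySem.Str.isIn "udemy" (PySem.Str.lower query))
    (PySem.Str.isIn "python" (PySem.Str.lower query)) (PySem.Str.isIn "edx" (PySem.Str.lower query))
    (PySem.Str.isIn "mit" (PySem.Str.lower query)) (PySem.Str.isIn "harvard" (PySem.Str.lower query))
    (PySem.Str.isIn "cs50" (PySem.Str.lower query)) (PySem.Str.isIn "stanford" (PySem.Str.lower query))
    (PySem.Str.isIn "cs229" (PySem.Str.lower query)) (PySem.Str.isIn "cs231n" (PySem.Str.lower query))
    (PySem.Str.isIn "computer vision" (PySem.Str.lower query)) (PySem.Str.isIn "o'reilly" (PySem.Str.lower query))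
    (PySem.Str.isIn "oreilly" (PySem.Str.lower query))
    (pv_andrew_ng_imp_ng (PySem.Str.lower query))
    pvItem1 pvItem2 pvItem3 pvItem4 pvItem5 pvItem6 pvItem7 pvItem8 pvItem9 pvItem10
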